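-- pv_equiv track=rewrite | github.com/Rbmmmm/OpenRisk-Advisor | code/scripts/signal_engine.py | build_k_of_n_flags
-- ===== SOURCE A (Python) =====
-- from typing import Dict, List, Optional, Tuple
--
-- def build_k_of_n_flags(flags: List[bool], k: int, n: int) -> List[bool]:
--     if not flags:
--         return []
--     result = []
--     for idx in range(len(flags)):
--         start = max(0, idx - n + 1)
--         count = sum(1 for v in flags[start : idx + 1] if v)
--         result.append(count >= k)
--     return result
-- ===== SOURCE B (Python) =====
-- def build_k_of_n_flags(flags, k, n):
--     if n <= 0:
--         flag = 0 >= k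
--         return [flag for _ in flags]
--     result = []
--     count = 0
--     for idx, v in enumerate(flags):
--         if v:
--             count += 1
--         if idx >= n and flags[idx - n]:
--             count -= 1
--         result.append(count >= k)
--     return result
-- ===== Notes on version B (the rewrite author's own statement) =====
-- stated objective: faster
-- what changed: Replaced the per-index recount of the last-n window (a fresh slice and sum for every position) by a single sliding-window pass that increments the count for the entering element and decrements it for the leaving one.
import Mathlib
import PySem

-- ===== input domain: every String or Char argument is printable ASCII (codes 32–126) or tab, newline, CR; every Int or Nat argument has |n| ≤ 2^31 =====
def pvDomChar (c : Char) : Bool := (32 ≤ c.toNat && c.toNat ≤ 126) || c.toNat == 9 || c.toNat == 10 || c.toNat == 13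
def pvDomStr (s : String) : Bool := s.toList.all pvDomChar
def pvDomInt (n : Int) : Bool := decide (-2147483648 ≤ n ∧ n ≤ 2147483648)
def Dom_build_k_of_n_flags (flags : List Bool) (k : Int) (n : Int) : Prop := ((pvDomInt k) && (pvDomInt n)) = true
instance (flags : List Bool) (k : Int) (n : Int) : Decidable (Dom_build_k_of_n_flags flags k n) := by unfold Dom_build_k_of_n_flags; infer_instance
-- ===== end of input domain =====

-- B replaces A's per-index recount of the last-n window by one sliding-window pass (add the
-- entering element, drop the leaving one): O(len) instead of O(len*n).

-- ===== PORT A =====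
def build_k_of_n_flags (flags : List Bool) (k : Int) (n : Int) : List Bool :=
  if flags = [] then []
  else
    (PySem.List.pyRange 0 (flags.length : Int) 1).foldl
      (fun result idx =>
        let start : Int := max 0 (idx - n + 1)
        let count : Int :=
          (PySem.List.slice flags (some start) (some (idx + 1))).foldl
            (fun c v => if v then c + 1 else c) 0
        result ++ [decide (count ≥ k)]) []

-- ===== PORT B =====
-- flags[idx - n] is read only under the guard idx >= n, where the index is in range;
-- pyGetD with default false is exact there.
def build_k_of_n_flags_alt (flags : List Bool) (k : Int) (n : Int) : List Bool :=
  if n ≤ 0 then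
    let flag := decide ((0:Int) ≥ k)
    flags.map (fun _ => flag)
  else
    ((PySem.List.enumerate flags 0).foldl
      (fun (st : Int × List Bool) p =>
        let c1 : Int := if p.2 then st.1 + 1 else st.1
        let c2 : Int := if p.1 ≥ n ∧ PySem.List.pyGetD flags (p.1 - n) false then c1 - 1 else c1
        (c2, st.2 ++ [decide (c2 ≥ k)]))
      ((0 : Int), ([] : List Bool))).2

-- ===== PRECONDITION & SPEC =====
def Spec_build_k_of_n_flags (flags : List Bool) (k : Int) (n : Int) (out : List Bool) : Prop := out = build_k_of_n_flags_alt flags k n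
instance (flags : List Bool) (k : Int) (n : Int) (out : List Bool) : Decidable (Spec_build_k_of_n_flags flags k n out) := by unfold Spec_build_k_of_n_flags; infer_instance

-- ===== CLAIM (what is proved, stated in full; the proofs are below) =====
def Claim_equal_build_k_of_n_flags : Prop := ∀ (flags : List Bool) (k : Int) (n : Int), Dom_build_k_of_n_flags flags k n → Spec_build_k_of_n_flags flags k n (build_k_of_n_flags flags k n)

-- ===== LEMMAS AND PROOFS =====

/-- Count of `true`s in the window of (at most) `t` elements ending just before position `j`. -/
def winCnt (flags : List Bool) (t : Nat) (j : Nat) : Int :=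
  (((flags.take j).drop (j - t)).countP (fun v => v) : Int)

/-- The common reference result. -/
def refOut (flags : List Bool) (k : Int) (t : Nat) : List Bool :=
  (List.range flags.length).map (fun i => decide (winCnt flags t (i + 1) ≥ k))

lemma winCnt_zero (flags : List Bool) (t : Nat) : winCnt flags t 0 = 0 := by
  simp [winCnt]

lemma winCnt_succ (flags : List Bool) (t : Nat) (m : Nat) (ht : 1 ≤ t)
    (hm : m < flags.length) :
    winCnt flags t (m + 1) =
      (if flags[m] then winCnt flags t m + 1 else winCnt flags t m) -
        (if t ≤ m ∧ flags.getD (m - t) false then 1 else 0) := by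
  have htake : flags.take (m + 1) = flags.take m ++ [flags[m]] := by
    rw [List.take_add_one]
    simp [List.getElem?_eq_getElem hm]
  have hlen : (flags.take m).length = m := List.length_take_of_le (by omega)
  have hdrop : (flags.take (m + 1)).drop (m + 1 - t) =
      (flags.take m).drop (m + 1 - t) ++ [flags[m]] := by
    rw [htake, List.drop_append_of_le_length (by omega)]
  by_cases hc : t ≤ m
  · -- window is full: one element leaves
    have hmt : m - t < (flags.take m).length := by omega
    have hsplit : (flags.take m).drop (m - t) =
        (flags.take m)[m - t] :: (flags.take m).drop (m - t + 1) :=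
      List.drop_eq_getElem_cons hmt
    have hget : (flags.take m)[m - t] = flags[m - t] := by
      simp [List.getElem_take]
    have hgetD : flags.getD (m - t) false = flags[m - t] := List.getD_eq_getElem _ _ (by omega)
    have h1 : m + 1 - t = m - t + 1 := by omega
    unfold winCnt
    rw [hdrop, h1, List.countP_append, hsplit, List.countP_cons, hget, hgetD]
    by_cases hv : flags[m] <;> by_cases hw : flags[m - t] <;>
      simp [hv, hw, hc]
  · -- window still growing: nothing leaves
    have h0 : m + 1 - t = 0 := by omega
    have h0' : m - t = 0 := by omega
    unfold winCnt
    rw [hdrop, h0, h0', List.countP_append]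
    by_cases hv : flags[m] <;> simp [hv, hc]

/-- Guard of B's decrement, rewritten over Nat indices. -/
lemma guard_iff (flags : List Bool) (n : Int) (m : Nat) (hn : 1 ≤ n)
    (hm : m < flags.length) :
    (((m : Int) ≥ n ∧ PySem.List.pyGetD flags ((m : Int) - n) false) ↔
      (n.toNat ≤ m ∧ flags.getD (m - n.toNat) false)) := by
  constructor
  · rintro ⟨h1, h2⟩
    have ht : n.toNat ≤ m := by omega
    refine ⟨ht, ?_⟩
    have : (m : Int) - n = ((m - n.toNat : Nat) : Int) := by omega
    rwa [this, PySem.List.pyGetD_natCast] at h2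
  · rintro ⟨h1, h2⟩
    refine ⟨by omega, ?_⟩
    have : (m : Int) - n = ((m - n.toNat : Nat) : Int) := by omega
    rwa [this, PySem.List.pyGetD_natCast]

/-- Invariant of B's sliding-window fold. -/
lemma b_fold_inv (flags : List Bool) (k : Int) (n : Int) (hn : 1 ≤ n) :
    ∀ (suf : List Bool) (m : Nat), m ≤ flags.length → flags.drop m = suf →
      (PySem.List.enumerate suf (m : Int)).foldl
        (fun (st : Int × List Bool) p =>
          let c1 : Int := if p.2 then st.1 + 1 else st.1
          let c2 : Int := if p.1 ≥ n ∧ PySem.List.pyGetD flags (p.1 - n) false then c1 - 1 else c1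
          (c2, st.2 ++ [decide (c2 ≥ k)]))
        (winCnt flags n.toNat m, (List.range m).map (fun i => decide (winCnt flags n.toNat (i + 1) ≥ k)))
      = (winCnt flags n.toNat flags.length, refOut flags k n.toNat) := by
  intro suf
  induction suf with
  | nil =>
    intro m _hm hdrop
    have : m = flags.length := by
      have := congrArg List.length hdrop
      simp at this; omega
    subst this
    simp [PySem.List.enumerate, refOut]
  | cons v suf ih =>
    intro m hm hdrop
    have hmlt : m < flags.length := by
      have := congrArg List.length hdrop
      simp at this; omega
    have hv : flags[m] = v := by
      have h0 : (flags.drop m).head? = some v := by rw [hdrop]; rfl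
      rw [List.head?_drop, List.getElem?_eq_getElem hmlt] at h0
      exact Option.some.inj h0
    rw [PySem.List.enumerate_cons, List.foldl_cons]
    have hguard : (((m : Int) ≥ n ∧ PySem.List.pyGetD flags ((m : Int) - n) false) ↔
        (n.toNat ≤ m ∧ flags.getD (m - n.toNat) false)) := guard_iff flags n m hn hmlt
    have hc2 : (if ((m : Int) ≥ n ∧ PySem.List.pyGetD flags ((m : Int) - n) false) then
          (if v then winCnt flags n.toNat m + 1 else winCnt flags n.toNat m) - 1
        else (if v then winCnt flags n.toNat m + 1 else winCnt flags n.toNat m))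
        = winCnt flags n.toNat (m + 1) := by
      rw [winCnt_succ flags n.toNat m (by omega) hmlt, hv]
      by_cases hg : (n.toNat ≤ m ∧ flags.getD (m - n.toNat) false)
      · rw [if_pos (hguard.mpr hg), if_pos hg]
      · rw [if_neg (fun h => hg (hguard.mp h)), if_neg hg]; ring
    simp only
    rw [hc2]
    have hrange : (List.range m).map (fun i => decide (winCnt flags n.toNat (i + 1) ≥ k)) ++
        [decide (winCnt flags n.toNat (m + 1) ≥ k)] =
        (List.range (m + 1)).map (fun i => decide (winCnt flags n.toNat (i + 1) ≥ k)) := by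
      rw [List.range_succ, List.map_append]; simp
    rw [hrange]
    have : (m : Int) + 1 = ((m + 1 : Nat) : Int) := by push_cast; ring
    rw [this]
    exact ih (m + 1) (by omega) (by rw [← List.tail_drop, hdrop]; rfl)

/-- B equals the reference for n ≥ 1. -/
lemma b_eq_ref (flags : List Bool) (k : Int) (n : Int) (hn : 1 ≤ n) :
    build_k_of_n_flags_alt flags k n = refOut flags k n.toNat := by
  simp only [build_k_of_n_flags_alt, if_neg (show ¬ n ≤ 0 by omega)]
  have h := b_fold_inv flags k n hn flags 0 (by omega) rfl
  rw [winCnt_zero] at h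
  simp only [List.range_zero, List.map_nil, Int.natCast_zero] at h
  rw [h]

/-- A's inner count over the slice equals the window count, for n ≥ 1. -/
lemma a_count_eq (flags : List Bool) (n : Int) (hn : 1 ≤ n) (i : Nat) (_hi : i < flags.length) :
    (PySem.List.slice flags (some (max 0 ((i : Int) - n + 1))) (some ((i : Int) + 1))).foldl
      (fun c v => if v then c + 1 else c) (0 : Int) = winCnt flags n.toNat (i + 1) := by
  rw [PySem.List.foldl_if_add_one]
  have hs : (0 : Int) ≤ max 0 ((i : Int) - n + 1) := le_max_left _ _
  rw [PySem.List.slice_toNat _ hs (by omega)]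
  have hsn : (max 0 ((i : Int) - n + 1)).toNat = i + 1 - n.toNat := by omega
  have hin : ((i : Int) + 1).toNat = i + 1 := by omega
  rw [hsn, hin]
  unfold winCnt
  rw [List.drop_take]
  omega

/-- A equals the reference for n ≥ 1. -/
lemma a_eq_ref (flags : List Bool) (k : Int) (n : Int) (hn : 1 ≤ n) :
    build_k_of_n_flags flags k n = refOut flags k n.toNat := by
  by_cases hf : flags = []
  · subst hf; simp [build_k_of_n_flags, refOut]
  · simp only [build_k_of_n_flags, if_neg hf]
    rw [PySem.List.pyRange_one, List.foldl_map,
      PySem.List.foldl_append_singleton_eq_map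
        (f := fun j : Nat => decide
          ((PySem.List.slice flags (some (max 0 ((0 : Int) + (j : Int) - n + 1)))
            (some ((0 : Int) + (j : Int) + 1))).foldl (fun c v => if v then c + 1 else c) (0 : Int) ≥ k))]
    simp only [Int.sub_zero, Int.toNat_natCast, List.nil_append, refOut]
    apply List.map_congr_left
    intro i hi
    rw [List.mem_range] at hi
    have : (0 : Int) + (i : Int) = (i : Int) := by ring
    simp only [Int.zero_add]
    rw [a_count_eq flags n hn i hi]

/-- Both sides for n ≤ 0: every window is empty in A; B returns the constant list. -/
lemma eq_of_nonpos (flags : List Bool) (k : Int) (n : Int) (hn : n ≤ 0) :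
    build_k_of_n_flags flags k n = build_k_of_n_flags_alt flags k n := by
  by_cases hf : flags = []
  · subst hf; simp [build_k_of_n_flags, build_k_of_n_flags_alt]
  · simp only [build_k_of_n_flags, build_k_of_n_flags_alt, if_neg hf, if_pos hn]
    rw [PySem.List.pyRange_one, List.foldl_map,
      PySem.List.foldl_append_singleton_eq_map
        (f := fun j : Nat => decide
          ((PySem.List.slice flags (some (max 0 ((0 : Int) + (j : Int) - n + 1)))
            (some ((0 : Int) + (j : Int) + 1))).foldl (fun c v => if v then c + 1 else c) (0 : Int) ≥ k))]
    simp only [Int.sub_zero, Int.toNat_natCast, List.nil_append]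
    have hcount : ∀ j : Nat,
        (PySem.List.slice flags (some (max 0 ((0 : Int) + (j : Int) - n + 1)))
          (some ((0 : Int) + (j : Int) + 1))).foldl (fun c v => if v then c + 1 else c) (0 : Int) = 0 := by
      intro j
      have hs : (0 : Int) ≤ max 0 ((0 : Int) + (j : Int) - n + 1) := le_max_left _ _
      rw [PySem.List.slice_toNat _ hs (by omega)]
      have : ((0 : Int) + (j : Int) + 1).toNat ≤ (max 0 ((0 : Int) + (j : Int) - n + 1)).toNat := by omega
      rw [Nat.sub_eq_zero_of_le this]
      simp
    simp only [hcount]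
    rw [List.map_const', List.map_const', List.length_range]

-- ===== VERDICT (by name: the statement is the Claim_ definition above) =====
theorem build_k_of_n_flags_spec : Claim_equal_build_k_of_n_flags := by
  intro flags k n _
  unfold Spec_build_k_of_n_flags
  by_cases hn : n ≤ 0
  · exact eq_of_nonpos flags k n hn
  · rw [a_eq_ref flags k n (by omega), b_eq_ref flags k n (by omega)]
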